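-- pv_equiv track=rewrite | github.com/tharittk/AoC-2024 | day8/day8.py | find_all_antinode_loc
-- ===== SOURCE A (Python) =====
-- def find_all_antinode_loc(antenna_loc):
--
--     # set takes care of duplication
--     locs = set()
--
--     for i in range(len(antenna_loc)):
--         for j in range(i+1, len(antenna_loc)):
--
--             antinode_locs = compute_antinode_loc_from_pair( antenna_loc[i], antenna_loc[j] )
--
--
--             for loc in antinode_locs:
--                 locs.add(loc)
--     return locs
--
-- def compute_antinode_loc_from_pair(loc1, loc2):
--     dx, dy = loc2[0] - loc1[0], loc2[1] - loc1[1]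
--
--     loc1_ext = (loc1[0] + 2 * dx, loc1[1] + 2 * dy)
--     loc2_ext = (loc2[0] - 2 * dx, loc2[1] - 2 * dy)
--
--     return [loc1_ext, loc2_ext]
-- ===== SOURCE B (Python) =====
-- def find_all_antinode_loc(antenna_loc):
--     # index-free: generate every antinode by structural recursion, dedup once at the end
--     return set(_all_antinodes(antenna_loc))
--
-- def _all_antinodes(locs):
--     if not locs:
--         return []
--     (x1, y1), rest = locs[0], locs[1:]
--     here = [p for (x2, y2) in rest
--               for p in ((2 * x2 - x1, 2 * y2 - y1), (2 * x1 - x2, 2 * y1 - y2))]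
--     return here + _all_antinodes(rest)
-- ===== Notes on version B (the rewrite author's own statement) =====
-- stated objective: simpler
-- what changed: Replaced the doubly index-nested loops with incremental set.add and a two-output helper by an index-free structural recursion (head vs. rest) that emits each antinode directly as 2*q-p in a flat comprehension and deduplicates once with a single set() at the end.
import Mathlib
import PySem

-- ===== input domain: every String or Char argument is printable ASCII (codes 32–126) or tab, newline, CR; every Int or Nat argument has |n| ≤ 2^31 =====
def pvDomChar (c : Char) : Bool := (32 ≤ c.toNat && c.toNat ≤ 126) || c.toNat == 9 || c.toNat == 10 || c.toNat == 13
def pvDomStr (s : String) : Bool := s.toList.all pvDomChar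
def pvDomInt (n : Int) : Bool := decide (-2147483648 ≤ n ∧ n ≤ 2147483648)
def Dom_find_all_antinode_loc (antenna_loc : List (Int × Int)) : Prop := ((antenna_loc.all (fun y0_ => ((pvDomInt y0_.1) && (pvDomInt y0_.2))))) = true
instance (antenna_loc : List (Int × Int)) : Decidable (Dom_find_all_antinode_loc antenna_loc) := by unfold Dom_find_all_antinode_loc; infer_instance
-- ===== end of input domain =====

-- B replaces A's index-nested loops + two-output helper by an index-free structural
-- recursion emitting each antinode directly, with one final dedup (objective: simpler).

-- ===== PORT A =====
def pvComputeAntinodeLocFromPair (loc1 loc2 : Int × Int) : List (Int × Int) :=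
  let dx := loc2.1 - loc1.1
  let dy := loc2.2 - loc1.2
  let loc1_ext := (loc1.1 + 2 * dx, loc1.2 + 2 * dy)
  let loc2_ext := (loc2.1 - 2 * dx, loc2.2 - 2 * dy)
  [loc1_ext, loc2_ext]

def find_all_antinode_loc (antenna_loc : List (Int × Int)) : List (Int × Int) :=
  (PySem.List.pyRange 0 antenna_loc.length 1).foldl (fun locs i =>
    (PySem.List.pyRange (i + 1) antenna_loc.length 1).foldl (fun locs j =>
      -- indices produced by range(len) / range(i+1, len) are always in bounds, so
      -- pyGetD with a dummy default is exact for antenna_loc[i] / antenna_loc[j]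
      (pvComputeAntinodeLocFromPair (PySem.List.pyGetD antenna_loc i (0, 0))
          (PySem.List.pyGetD antenna_loc j (0, 0))).foldl PySem.Set.add locs) locs)
    PySem.Set.empty

-- ===== PORT B =====
def pvAllAntinodes : List (Int × Int) → List (Int × Int)
  | [] => []
  | (x1, y1) :: rest =>
      (rest.flatMap (fun q =>
        [(2 * q.1 - x1, 2 * q.2 - y1), (2 * x1 - q.1, 2 * y1 - q.2)])) ++ pvAllAntinodes rest

def find_all_antinode_loc_alt (antenna_loc : List (Int × Int)) : List (Int × Int) :=
  PySem.Set.ofList (pvAllAntinodes antenna_loc)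

-- ===== PRECONDITION & SPEC =====
def Spec_find_all_antinode_loc (antenna_loc : List (Int × Int)) (out : List (Int × Int)) : Prop := out = find_all_antinode_loc_alt antenna_loc
instance (antenna_loc : List (Int × Int)) (out : List (Int × Int)) : Decidable (Spec_find_all_antinode_loc antenna_loc out) := by unfold Spec_find_all_antinode_loc; infer_instance

-- ===== CLAIM (what is proved, stated in full; the proofs are below) =====
def Claim_equal_find_all_antinode_loc : Prop := ∀ (antenna_loc : List (Int × Int)), Dom_find_all_antinode_loc antenna_loc → Spec_find_all_antinode_loc antenna_loc (find_all_antinode_loc antenna_loc)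

-- ===== LEMMAS AND PROOFS =====

theorem pvComputePair_eq (p q : Int × Int) :
    pvComputeAntinodeLocFromPair p q =
      [(2 * q.1 - p.1, 2 * q.2 - p.2), (2 * p.1 - q.1, 2 * p.2 - q.2)] := by
  simp [pvComputeAntinodeLocFromPair]
  refine ⟨⟨by ring, by ring⟩, ⟨by ring, by ring⟩⟩

theorem pvAllAntinodes_cons (p : Int × Int) (rest : List (Int × Int)) :
    pvAllAntinodes (p :: rest)
      = rest.flatMap (fun q =>
          [(2 * q.1 - p.1, 2 * q.2 - p.2), (2 * p.1 - q.1, 2 * p.2 - q.2)])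
        ++ pvAllAntinodes rest := by
  cases p; rfl

-- A's inner loop over `rest` (two adds per element) is one add-fold of the flat antinode list
theorem pv_inner (p : Int × Int) (rest : List (Int × Int)) (s : PySem.Set (Int × Int)) :
    rest.foldl (fun locs q => (pvComputeAntinodeLocFromPair p q).foldl PySem.Set.add locs) s
      = (rest.flatMap (fun q =>
          [(2 * q.1 - p.1, 2 * q.2 - p.2), (2 * p.1 - q.1, 2 * p.2 - q.2)])).foldl
          PySem.Set.add s := by
  induction rest generalizing s with
  | nil => rfl
  | cons q rest ih =>
      simp only [List.foldl_cons, List.flatMap_cons, List.foldl_append]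
      rw [ih]
      congr 1
      rw [pvComputePair_eq]
      rfl

-- A's outer loop, started at index a, folds the adds of all antinodes generated from l.drop a
theorem pv_outer (l : List (Int × Int)) (a : Nat) (s : PySem.Set (Int × Int)) :
    (PySem.List.pyRange (a : Int) l.length 1).foldl (fun locs i =>
        (PySem.List.pyRange (i + 1) l.length 1).foldl (fun locs j =>
          (pvComputeAntinodeLocFromPair (PySem.List.pyGetD l i (0, 0))
              (PySem.List.pyGetD l j (0, 0))).foldl PySem.Set.add locs) locs) s
      = (pvAllAntinodes (l.drop a)).foldl PySem.Set.add s := by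
  by_cases h : a < l.length
  · have hcons : PySem.List.pyRange (a : Int) l.length 1
        = (a : Int) :: PySem.List.pyRange ((a : Int) + 1) l.length 1 :=
      PySem.List.pyRange_one_cons (by exact_mod_cast h)
    rw [hcons, List.foldl_cons]
    have hdrop : l.drop a = l[a] :: l.drop (a + 1) := List.drop_eq_getElem_cons h
    have hget : PySem.List.pyGetD l (a : Int) (0, 0) = l[a] := by
      rw [PySem.List.pyGetD_natCast]
      exact List.getD_eq_getElem l _ h
    have hcast : ((a : Int) + 1) = ((a + 1 : Nat) : Int) := by push_cast; ring
    have hinner :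
        (PySem.List.pyRange ((a : Int) + 1) l.length 1).foldl (fun locs j =>
            (pvComputeAntinodeLocFromPair (PySem.List.pyGetD l (a : Int) (0, 0))
                (PySem.List.pyGetD l j (0, 0))).foldl PySem.Set.add locs) s
          = ((l.drop (a + 1)).flatMap (fun q =>
              [(2 * q.1 - l[a].1, 2 * q.2 - l[a].2),
               (2 * l[a].1 - q.1, 2 * l[a].2 - q.2)])).foldl PySem.Set.add s := by
      rw [hcast]
      have hfold : List.foldl (fun locs j => List.foldl PySem.Set.add locs
            (pvComputeAntinodeLocFromPair (PySem.List.pyGetD l (a : Int) (0, 0))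
              (PySem.List.pyGetD l j (0, 0))))
            s (PySem.List.pyRange ((a + 1 : Nat) : Int) l.length 1)
          = List.foldl (fun acc y => List.foldl PySem.Set.add acc
              (pvComputeAntinodeLocFromPair (PySem.List.pyGetD l (a : Int) (0, 0)) y)) s
              (l.drop (((a + 1 : Nat) : Int)).toNat) :=
        PySem.List.foldl_pyRange_pyGetD l ((0, 0) : Int × Int)
          (fun acc y => List.foldl PySem.Set.add acc
            (pvComputeAntinodeLocFromPair (PySem.List.pyGetD l (a : Int) (0, 0)) y))
          s (Int.natCast_nonneg _)
      rw [hfold, Int.toNat_natCast,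
        pv_inner (PySem.List.pyGetD l (a : Int) (0, 0)) _ s, hget]
    rw [hinner, hcast, pv_outer l (a + 1)]
    conv_rhs => rw [hdrop, pvAllAntinodes_cons, List.foldl_append]
  · have hle : l.length ≤ a := Nat.le_of_not_lt h
    have h1 : PySem.List.pyRange (a : Int) l.length 1 = [] :=
      PySem.List.pyRange_one_eq_nil (by exact_mod_cast hle)
    rw [h1, List.drop_eq_nil_of_le hle]
    rfl
termination_by l.length - a

theorem find_all_antinode_loc_spec : Claim_equal_find_all_antinode_loc := by
  intro l _
  show find_all_antinode_loc l = find_all_antinode_loc_alt l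
  have := pv_outer l 0 PySem.Set.empty
  simp only [Nat.cast_zero, List.drop_zero] at this
  rw [find_all_antinode_loc, this, find_all_antinode_loc_alt, PySem.Set.ofList_eq_foldl]
  rfl
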